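-- pv_equiv track=rewrite | github.com/JiangHanChao/NetworkMotifDiscoveryAlgo | comofinder/Algorithm.py | Binarysort
-- ===== SOURCE A (Python) =====
-- def Binarysort(array, node):
--     low = 0
--     high = len(array) - 1
--     while low <= high:
--         mid = int((low + high)/2)
--         if node < array[mid]:
--             high = mid - 1
--         elif node > array[mid]:
--             low = mid + 1
--         else:
--             return True
--     array.append(node)
--     return False
-- ===== SOURCE B (Python) =====
-- def Binarysort(array, node):
--     def search(low, high):
--         if low > high:
--             return False
--         mid = int((low + high) / 2)
--         if node < array[mid]:
--             return search(low, mid - 1)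
--         if node > array[mid]:
--             return search(mid + 1, high)
--         return True
--
--     if search(0, len(array) - 1):
--         return True
--     array.append(node)
--     return False
-- ===== Notes on version B (the rewrite author's own statement) =====
-- stated objective: alternative
-- what changed: The iterative while-loop binary search is re-decomposed as a recursive search(low, high) helper; the append-if-absent happens once at the top level after the recursion.
import Mathlib
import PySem

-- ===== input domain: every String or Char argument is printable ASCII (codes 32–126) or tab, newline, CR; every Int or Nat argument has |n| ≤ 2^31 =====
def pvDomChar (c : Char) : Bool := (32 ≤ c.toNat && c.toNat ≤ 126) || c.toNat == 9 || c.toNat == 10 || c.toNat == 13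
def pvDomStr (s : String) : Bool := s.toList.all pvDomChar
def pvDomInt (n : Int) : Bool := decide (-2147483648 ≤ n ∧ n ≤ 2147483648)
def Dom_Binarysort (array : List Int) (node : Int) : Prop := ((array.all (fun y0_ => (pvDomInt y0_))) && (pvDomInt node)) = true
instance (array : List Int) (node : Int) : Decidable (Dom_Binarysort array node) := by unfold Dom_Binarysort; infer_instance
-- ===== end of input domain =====

-- B re-decomposes A's while-loop binary search as a recursive search(low, high) helper (same probes, append-if-absent
-- mutation kept at top level); both mutate the list on absence — the equivalence proved here is about the RETURN value.

-- ===== PORT A =====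
-- A's while-loop, with fuel (array.length + 1 suffices: the search range shrinks every iteration).
-- On the reachable states (0 ≤ low ≤ high < len) mid = int((low+high)/2) equals floordiv; array[mid] is in range,
-- so the `none` branch (Python IndexError) is unreachable.
def BinLoopA (array : List Int) (node : Int) : Nat → Int → Int → Bool
  | 0, _, _ => false
  | f + 1, low, high =>
    if low ≤ high then
      let mid := PySem.Int.floordiv (low + high) 2
      match PySem.List.pyGet? array mid with
      | none => false
      | some v =>
        if node < v then BinLoopA array node f low (mid - 1)
        else if node > v then BinLoopA array node f (mid + 1) high
        else true
    else false

def Binarysort (array : List Int) (node : Int) : Bool :=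
  BinLoopA array node (array.length + 1) 0 ((array.length : Int) - 1)

-- ===== PORT B =====
-- B's recursive search(low, high); terminates by the shrinking range (well-founded recursion, no fuel).
def BinSearchB (array : List Int) (node : Int) (low high : Int) : Bool :=
  if h : low ≤ high then
    match PySem.List.pyGet? array (PySem.Int.floordiv (low + high) 2) with
    | none => false
    | some v =>
      if node < v then BinSearchB array node low (PySem.Int.floordiv (low + high) 2 - 1)
      else if node > v then BinSearchB array node (PySem.Int.floordiv (low + high) 2 + 1) high
      else true
  else false
termination_by (high + 1 - low).toNat
decreasing_by
  · have := PySem.Int.floordiv_two_mid_bounds h; omega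
  · have := PySem.Int.floordiv_two_mid_bounds h; omega

def Binarysort_alt (array : List Int) (node : Int) : Bool :=
  BinSearchB array node 0 ((array.length : Int) - 1)

-- ===== PRECONDITION & SPEC =====
def Spec_Binarysort (array : List Int) (node : Int) (out : Bool) : Prop := out = Binarysort_alt array node
instance (array : List Int) (node : Int) (out : Bool) : Decidable (Spec_Binarysort array node out) := by unfold Spec_Binarysort; infer_instance

-- ===== CLAIM (what is proved, stated in full; the proofs are below) =====
def Claim_equal_Binarysort : Prop := ∀ (array : List Int) (node : Int), Dom_Binarysort array node → Spec_Binarysort array node (Binarysort array node)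

-- ===== LEMMAS AND PROOFS =====
theorem binLoopA_eq_search (array : List Int) (node : Int) :
    ∀ (f : Nat) (low high : Int), (high + 1 - low).toNat < f →
      BinLoopA array node f low high = BinSearchB array node low high := by
  intro f
  induction f with
  | zero => intro low high hf; omega
  | succ f ih =>
    intro low high hf
    rw [BinSearchB]
    by_cases h : low ≤ high
    · have hmid := PySem.Int.floordiv_two_mid_bounds h
      simp only [BinLoopA, h, if_true]
      cases PySem.List.pyGet? array (PySem.Int.floordiv (low + high) 2) with
      | none => rfl
      | some v =>
        by_cases h1 : node < v
        · simp only [h1, if_true]; exact ih low _ (by omega)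
        · by_cases h2 : node > v
          · simp only [h1, h2, if_true, if_false]; exact ih _ high (by omega)
          · simp [h1, h2]
    · simp [BinLoopA, h]

-- ===== VERDICT (by name: the statement is the Claim_ definition above) =====
theorem Binarysort_spec : Claim_equal_Binarysort := by
  intro array node _
  unfold Spec_Binarysort Binarysort Binarysort_alt
  exact binLoopA_eq_search array node _ 0 _ (by omega)
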